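-- pv_equiv track=rewrite | github.com/Hardcoreaiin/hardcore-ai | hardcore-desktop/bundled/backend/stm32_clock_config.py | _calculate_flash_latency
-- ===== SOURCE A (Python) =====
-- def _calculate_flash_latency(sysclk_mhz: int, mcu_type: str) -> int:
--     """
--     Calculate required flash wait states
--     Based on voltage range and frequency
--     """
--     # Assuming 3.3V operation (voltage range 2.7-3.6V)
--     latency_table = {
--         'stm32f4': [
--             (30, 0), (60, 1), (90, 2), (120, 3), (150, 4), (168, 5)
--         ],
--         'stm32f7': [
--             (30, 0), (60, 1), (90, 2), (120, 3), (150, 4),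
--             (180, 5), (210, 6), (216, 7)
--         ],
--         'stm32l4': [
--             (16, 0), (32, 1), (48, 2), (64, 3), (80, 4)
--         ],
--         'stm32h7': [
--             (70, 0), (140, 1), (210, 2), (280, 3), (480, 4)
--         ]
--     }
--
--     table = latency_table.get(mcu_type, latency_table['stm32f4'])
--
--     for freq_limit, latency in table:
--         if sysclk_mhz <= freq_limit:
--             return latency
--
--     return table[-1][1]  # Return max latency
-- ===== SOURCE B (Python) =====
-- def _calculate_flash_latency(sysclk_mhz: int, mcu_type: str) -> int:
--     """
--     Calculate required flash wait states
--     Based on voltage range and frequency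
--     """
--     # Each family's thresholds are multiples of a uniform step (the last,
--     # irregular threshold only caps the same maximum latency), so the wait
--     # states are a clamped ceiling division instead of a table scan.
--     params = {
--         'stm32f4': (30, 5),
--         'stm32f7': (30, 7),
--         'stm32l4': (16, 4),
--         'stm32h7': (70, 4),
--     }
--     step, max_latency = params.get(mcu_type, (30, 5))
--     latency = -(-sysclk_mhz // step) - 1  # ceil(sysclk/step) - 1
--     return min(max_latency, max(0, latency))
-- ===== Notes on version B (the rewrite author's own statement) =====
-- stated objective: alternative
-- what changed: Replaces the table scan with a closed-form clamped ceiling division: each family's thresholds are multiples of a uniform step (the irregular last threshold only caps the same maximum latency), so latency = min(max_latency, max(0, ceil(sysclk/step)-1)).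
import Mathlib
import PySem

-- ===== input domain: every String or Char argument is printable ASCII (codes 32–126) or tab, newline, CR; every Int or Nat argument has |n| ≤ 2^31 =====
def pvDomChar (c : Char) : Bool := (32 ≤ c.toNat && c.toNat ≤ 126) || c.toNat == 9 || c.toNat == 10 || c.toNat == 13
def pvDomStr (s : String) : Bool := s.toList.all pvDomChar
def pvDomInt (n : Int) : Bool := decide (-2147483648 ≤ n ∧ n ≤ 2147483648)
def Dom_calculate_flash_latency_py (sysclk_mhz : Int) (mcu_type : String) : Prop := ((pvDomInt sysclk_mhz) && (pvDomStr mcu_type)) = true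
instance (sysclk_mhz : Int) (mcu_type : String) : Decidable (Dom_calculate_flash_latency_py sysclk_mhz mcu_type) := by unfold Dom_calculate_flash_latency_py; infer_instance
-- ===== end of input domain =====

-- B replaces A's table scan with a clamped ceiling division per family (alternative; same result).

-- ===== PORT A =====
def pvF4Table : List (Int × Int) := [(30, 0), (60, 1), (90, 2), (120, 3), (150, 4), (168, 5)]
def pvLatencyTable : PySem.Dict String (List (Int × Int)) :=
  PySem.Dict.ofList
    [("stm32f4", pvF4Table),
     ("stm32f7", [(30, 0), (60, 1), (90, 2), (120, 3), (150, 4), (180, 5), (210, 6), (216, 7)]),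
     ("stm32l4", [(16, 0), (32, 1), (48, 2), (64, 3), (80, 4)]),
     ("stm32h7", [(70, 0), (140, 1), (210, 2), (280, 3), (480, 4)])]

-- the 'for freq_limit, latency in table: if sysclk <= freq_limit: return latency' loop
def pvALoop (sysclk_mhz : Int) : List (Int × Int) → Option Int
  | [] => none
  | (freq_limit, latency) :: rest =>
      if sysclk_mhz ≤ freq_limit then some latency else pvALoop sysclk_mhz rest

def calculate_flash_latency_py (sysclk_mhz : Int) (mcu_type : String) : Int :=
  let table := pvLatencyTable.getD mcu_type pvF4Table
  match pvALoop sysclk_mhz table with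
  | some latency => latency
  | none =>
      match PySem.List.pyGet? table (-1) with  -- table[-1][1]
      | some p => p.2
      | none => 0  -- unreachable: every table in the dict is nonempty

-- ===== PORT B =====
def pvParams : PySem.Dict String (Int × Int) :=
  PySem.Dict.ofList
    [("stm32f4", (30, 5)), ("stm32f7", (30, 7)), ("stm32l4", (16, 4)), ("stm32h7", (70, 4))]

def calculate_flash_latency_py_alt (sysclk_mhz : Int) (mcu_type : String) : Int :=
  let p := pvParams.getD mcu_type (30, 5)
  let latency := -(PySem.Int.floordiv (-sysclk_mhz) p.1) - 1  -- ceil(sysclk/step) - 1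
  min p.2 (max 0 latency)

-- ===== PRECONDITION & SPEC =====
def Spec_calculate_flash_latency_py (sysclk_mhz : Int) (mcu_type : String) (out : Int) : Prop := out = calculate_flash_latency_py_alt sysclk_mhz mcu_type
instance (sysclk_mhz : Int) (mcu_type : String) (out : Int) : Decidable (Spec_calculate_flash_latency_py sysclk_mhz mcu_type out) := by unfold Spec_calculate_flash_latency_py; infer_instance

-- ===== CLAIM =====
def Claim_equal_calculate_flash_latency_py : Prop := ∀ (sysclk_mhz : Int) (mcu_type : String), Dom_calculate_flash_latency_py sysclk_mhz mcu_type → Spec_calculate_flash_latency_py sysclk_mhz mcu_type (calculate_flash_latency_py sysclk_mhz mcu_type)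

-- ===== LEMMAS AND PROOFS =====

-- the two dict lookups select matching (table, (step, max_latency)) pairs
theorem pvSel (m : String) :
    (pvLatencyTable.getD m pvF4Table = pvF4Table ∧ pvParams.getD m (30, 5) = (30, 5)) ∨
    (pvLatencyTable.getD m pvF4Table = [(30, 0), (60, 1), (90, 2), (120, 3), (150, 4), (180, 5), (210, 6), (216, 7)] ∧ pvParams.getD m (30, 5) = (30, 7)) ∨
    (pvLatencyTable.getD m pvF4Table = [(16, 0), (32, 1), (48, 2), (64, 3), (80, 4)] ∧ pvParams.getD m (30, 5) = (16, 4)) ∨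
    (pvLatencyTable.getD m pvF4Table = [(70, 0), (140, 1), (210, 2), (280, 3), (480, 4)] ∧ pvParams.getD m (30, 5) = (70, 4)) := by
  have h1 : pvLatencyTable = PySem.Dict.mk
    [("stm32f4", pvF4Table),
     ("stm32f7", [(30, 0), (60, 1), (90, 2), (120, 3), (150, 4), (180, 5), (210, 6), (216, 7)]),
     ("stm32l4", [(16, 0), (32, 1), (48, 2), (64, 3), (80, 4)]),
     ("stm32h7", [(70, 0), (140, 1), (210, 2), (280, 3), (480, 4)])] := by rfl
  have h2 : pvParams = PySem.Dict.mk
    [("stm32f4", (30, 5)), ("stm32f7", (30, 7)), ("stm32l4", (16, 4)), ("stm32h7", (70, 4))] := by rfl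
  simp only [h1, h2, PySem.Dict.getD, PySem.Dict.get?_mk_cons]
  split_ifs <;> simp_all [PySem.Dict.get?]

set_option maxHeartbeats 4000000 in
-- A's scan on a table equals B's clamped ceiling division with that table's step/max
theorem pvAgree (s step maxl : Int) (t : List (Int × Int))
    (ht : (t = pvF4Table ∧ step = 30 ∧ maxl = 5) ∨
          (t = [(30, 0), (60, 1), (90, 2), (120, 3), (150, 4), (180, 5), (210, 6), (216, 7)] ∧ step = 30 ∧ maxl = 7) ∨
          (t = [(16, 0), (32, 1), (48, 2), (64, 3), (80, 4)] ∧ step = 16 ∧ maxl = 4) ∨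
          (t = [(70, 0), (140, 1), (210, 2), (280, 3), (480, 4)] ∧ step = 70 ∧ maxl = 4)) :
    (match pvALoop s t with
     | some latency => latency
     | none => match PySem.List.pyGet? t (-1) with | some p => p.2 | none => 0) =
    min maxl (max 0 (-(PySem.Int.floordiv (-s) step) - 1)) := by
  have hdiv : ∀ a : Int, 0 < step → PySem.Int.floordiv a step = a / step := fun a h =>
    PySem.Int.floordiv_eq_ediv_of_pos h
  rcases ht with ⟨h, h1, h2⟩ | ⟨h, h1, h2⟩ | ⟨h, h1, h2⟩ | ⟨h, h1, h2⟩ <;>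
    subst h <;> subst h1 <;> subst h2 <;>
    rw [hdiv _ (by norm_num)] <;>
    simp only [pvF4Table, pvALoop, PySem.List.pyGet?, PySem.List.pyIdx?] <;>
    simp only [min_def, max_def] <;> split_ifs <;> simp_all <;> omega

-- ===== VERDICT =====
theorem calculate_flash_latency_py_spec : Claim_equal_calculate_flash_latency_py := by
  intro s m _
  unfold Spec_calculate_flash_latency_py calculate_flash_latency_py calculate_flash_latency_py_alt
  rcases pvSel m with ⟨ht, hp⟩ | ⟨ht, hp⟩ | ⟨ht, hp⟩ | ⟨ht, hp⟩ <;>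
    rw [ht, hp] <;>
    [exact pvAgree s 30 5 _ (Or.inl ⟨rfl, rfl, rfl⟩);
     exact pvAgree s 30 7 _ (Or.inr (Or.inl ⟨rfl, rfl, rfl⟩));
     exact pvAgree s 16 4 _ (Or.inr (Or.inr (Or.inl ⟨rfl, rfl, rfl⟩)));
     exact pvAgree s 70 4 _ (Or.inr (Or.inr (Or.inr ⟨rfl, rfl, rfl⟩)))]
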